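-- pv_equiv track=rewrite | github.com/RohanS1202/ragprobe | ragprobe/compare.py | _safety_counts
-- ===== SOURCE A (Python) =====
-- def _safety_counts(results: list[dict]) -> dict[str, int]:
--     """Count safety flags across all probe results."""
--     counts = {
--         "injection_compliance":      0,
--         "confidentiality_violation": 0,
--         "refusal_evasion":           0,
--     }
--     for r in results:
--         for flag in counts:
--             if r.get(flag):
--                 counts[flag] += 1
--     return counts
-- ===== SOURCE B (Python) =====
-- def _safety_counts(results: list[dict]) -> dict[str, int]:
--     """Count safety flags across all probe results."""
--     flags = ("injection_compliance",
--              "confidentiality_violation",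
--              "refusal_evasion")
--     tally = {}
--     for r in results:
--         for key, value in r.items():
--             if key in flags and value:
--                 tally[key] = tally.get(key, 0) + 1
--     return {flag: tally.get(flag, 0) for flag in flags}
-- ===== Notes on version B (the rewrite author's own statement) =====
-- stated objective: alternative
-- what changed: Instead of probing each record for each of the three fixed flags with r.get, B scans each record's own items once, tallying truthy flag hits into a dict keyed by the flags actually seen, and only at the end reads the three counts in order; the Lean Pre_ only excludes association lists in which a record has duplicate keys, which represent no Python dict (Python dict keys are unique).
import Mathlib
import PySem

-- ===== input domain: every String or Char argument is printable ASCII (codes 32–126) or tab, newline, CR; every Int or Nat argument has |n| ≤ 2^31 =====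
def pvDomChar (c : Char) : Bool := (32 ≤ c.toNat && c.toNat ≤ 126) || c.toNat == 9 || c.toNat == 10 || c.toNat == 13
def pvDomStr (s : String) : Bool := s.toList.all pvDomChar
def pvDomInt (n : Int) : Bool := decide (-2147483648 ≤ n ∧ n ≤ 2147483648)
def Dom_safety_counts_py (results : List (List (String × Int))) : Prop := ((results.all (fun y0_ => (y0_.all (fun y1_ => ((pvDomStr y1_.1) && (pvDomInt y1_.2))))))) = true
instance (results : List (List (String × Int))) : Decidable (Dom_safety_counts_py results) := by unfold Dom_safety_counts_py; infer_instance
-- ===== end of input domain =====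

-- B replaces A's per-flag probing of each record (three r.get lookups per record into a
-- mutable accumulator) by one scan of each record's own items, tallying truthy flag hits
-- into a dict and reading the three counts at the end (alternative decomposition, same cost).

-- r.get(flag): first-match lookup in the association list (exact Python dict.get, none = missing)
def pvGet (r : List (String × Int)) (k : String) : Option Int :=
  (r.find? (fun p => p.1 == k)).map (·.2)

-- Python truthiness of r.get(flag): None and 0 are falsy, every other int truthy (exact)
def pvTruthy (o : Option Int) : Bool :=
  match o with | some v => v != 0 | none => false

-- ===== PORT A =====
def safety_counts_py (results : List (List (String × Int))) : List (String × Int) :=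
  let counts : PySem.Dict String Int :=
    ((PySem.Dict.empty.insert "injection_compliance" 0).insert
        "confidentiality_violation" 0).insert "refusal_evasion" 0
  let final :=
    results.foldl (fun counts r =>
      counts.keys.foldl (fun c flag =>
        if pvTruthy (pvGet r flag) then c.modify flag 0 (· + 1) else c) counts)
      counts
  final.items

-- ===== PORT B =====
-- the flag tuple of Source B
def pvFlags : List String :=
  ["injection_compliance", "confidentiality_violation", "refusal_evasion"]

def safety_counts_py_alt (results : List (List (String × Int))) : List (String × Int) :=
  let tally : PySem.Dict String Int :=
    results.foldl (fun t r =>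
      r.foldl (fun t p =>
        if pvFlags.contains p.1 && p.2 != 0 then t.insert p.1 (t.getD p.1 0 + 1) else t) t)
      PySem.Dict.empty
  pvFlags.map (fun flag => (flag, tally.getD flag 0))

-- ===== PRECONDITION & SPEC =====
-- Pre_ excludes association lists in which a record has duplicate keys: those represent
-- no Python dict (dict keys are unique), so no Python input is excluded.
def Pre_safety_counts_py (results : List (List (String × Int))) : Prop :=
  ∀ r ∈ results, (r.map Prod.fst).Nodup
instance (results : List (List (String × Int))) : Decidable (Pre_safety_counts_py results) := by unfold Pre_safety_counts_py; infer_instance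

def pvWitness_safety_counts_py : (List (List (String × Int))) :=
  [[("injection_compliance", 1), ("other", 0)], [("refusal_evasion", 2)]]

def Spec_safety_counts_py (results : List (List (String × Int))) (out : List (String × Int)) : Prop := out = safety_counts_py_alt results
instance (results : List (List (String × Int))) (out : List (String × Int)) : Decidable (Spec_safety_counts_py results out) := by unfold Spec_safety_counts_py; infer_instance

-- ===== CLAIM (what is proved, stated in full; the proofs are below) =====
def Claim_equal_safety_counts_py : Prop := ∀ (results : List (List (String × Int))), Dom_safety_counts_py results → Pre_safety_counts_py results → Spec_safety_counts_py results (safety_counts_py results)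

-- ===== LEMMAS AND PROOFS =====

-- the per-record contribution of one flag (1 if truthy, else 0)
def pvOne (r : List (String × Int)) (flag : String) : Int :=
  if pvTruthy (pvGet r flag) then 1 else 0

-- ---- A side (loop invariant for A's interleaved pass) ----

-- one outer iteration of A: the inner loop over the three keys bumps each slot by its flag's contribution
theorem pv_step (r : List (String × Int)) (a b c : Int) :
    (["injection_compliance", "confidentiality_violation", "refusal_evasion"]).foldl
      (fun d flag => if pvTruthy (pvGet r flag) then d.modify flag 0 (· + 1) else d)
      (PySem.Dict.mk [("injection_compliance", a), ("confidentiality_violation", b), ("refusal_evasion", c)])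
    = PySem.Dict.mk [("injection_compliance", a + pvOne r "injection_compliance"),
        ("confidentiality_violation", b + pvOne r "confidentiality_violation"),
        ("refusal_evasion", c + pvOne r "refusal_evasion")] := by
  simp only [List.foldl_cons, List.foldl_nil, pvOne]
  by_cases h1 : pvTruthy (pvGet r "injection_compliance") <;>
    by_cases h2 : pvTruthy (pvGet r "confidentiality_violation") <;>
    by_cases h3 : pvTruthy (pvGet r "refusal_evasion") <;>
    simp [h1, h2, h3, PySem.Dict.modify, PySem.Dict.insert, PySem.Dict.getD,
      PySem.Dict.get?, PySem.Dict.contains, List.find?]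

-- loop invariant for A's outer fold: each slot = start value + sum of contributions seen
theorem pv_inv (results : List (List (String × Int))) (a b c : Int) :
    results.foldl (fun counts r =>
      counts.keys.foldl (fun d flag =>
        if pvTruthy (pvGet r flag) then d.modify flag 0 (· + 1) else d) counts)
      (PySem.Dict.mk [("injection_compliance", a), ("confidentiality_violation", b), ("refusal_evasion", c)])
    = PySem.Dict.mk [("injection_compliance", a + (results.map (fun r => pvOne r "injection_compliance")).sum),
        ("confidentiality_violation", b + (results.map (fun r => pvOne r "confidentiality_violation")).sum),
        ("refusal_evasion", c + (results.map (fun r => pvOne r "refusal_evasion")).sum)] := by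
  induction results generalizing a b c with
  | nil => simp
  | cons r rs ih =>
    simp only [List.foldl_cons, List.map_cons, List.sum_cons]
    rw [show (PySem.Dict.mk [("injection_compliance", a), ("confidentiality_violation", b),
          ("refusal_evasion", c)]).keys
        = ["injection_compliance", "confidentiality_violation", "refusal_evasion"] from rfl,
      pv_step, ih]
    simp [add_assoc]

-- ---- B side (what B's tally holds at each flag) ----

-- one record's scan: the tally slot of a flag grows by the number of its truthy occurrences
theorem pv_tally_rec (f : String) (hf : pvFlags.contains f = true)
    (r : List (String × Int)) (t : PySem.Dict String Int) :
    (r.foldl (fun t p =>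
        if pvFlags.contains p.1 && p.2 != 0 then t.insert p.1 (t.getD p.1 0 + 1) else t) t).getD f 0
    = t.getD f 0 + ((r.countP (fun p => p.1 == f && p.2 != 0) : Nat) : Int) := by
  induction r generalizing t with
  | nil => simp
  | cons p r ih =>
    obtain ⟨k, v⟩ := p
    simp only [List.foldl_cons, List.countP_cons]
    by_cases hg : (pvFlags.contains k && v != 0) = true
    · rw [if_pos hg, ih, PySem.Dict.getD_insert]
      by_cases hk : f = k
      · subst hk
        have hv : (v != 0) = true := ((Bool.and_eq_true _ _).mp hg).2
        rw [if_pos rfl]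
        simp only [beq_self_eq_true, Bool.true_and, hv, if_true]
        push_cast
        ring
      · rw [if_neg hk]
        have hb : (k == f) = false := by
          rw [beq_eq_false_iff_ne]
          exact fun h => hk h.symm
        simp [hb]
    · rw [if_neg hg, ih]
      have hcond : ((k == f) && (v != 0)) = false := by
        cases hvv : (v != 0) with
        | false => simp
        | true =>
          by_cases hkf : (k == f) = true
          · exfalso
            apply hg
            rw [beq_iff_eq.mp hkf]
            simp only [hvv, Bool.and_true]
            exact hf
          · simp [hkf]
      simp [hcond]

-- a record with distinct keys contributes exactly pvOne (A's truthiness of r.get)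
theorem pv_count_eq_one (f : String) (r : List (String × Int))
    (hnd : (r.map Prod.fst).Nodup) :
    ((r.countP (fun p => p.1 == f && p.2 != 0) : Nat) : Int) = pvOne r f := by
  induction r with
  | nil => simp [pvOne, pvGet, pvTruthy]
  | cons p r ih =>
    obtain ⟨k, v⟩ := p
    simp only [List.map_cons, List.nodup_cons] at hnd
    obtain ⟨hk, hnd'⟩ := hnd
    simp only [List.countP_cons]
    by_cases hkf : k = f
    · subst hkf
      have hz : r.countP (fun p => p.1 == k && p.2 != 0) = 0 := by
        rw [List.countP_eq_zero]
        intro p hp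
        have hne : p.1 ≠ k := fun h => hk (h ▸ List.mem_map_of_mem hp)
        simp [hne]
      rw [hz]
      by_cases hv : v = 0
      · subst hv
        simp [pvOne, pvGet, pvTruthy, List.find?]
      · have hv' : ((v : Int) != 0) = true := by simp [hv]
        simp [pvOne, pvGet, pvTruthy, List.find?, hv']
    · have hb : (k == f) = false := by simp [hkf]
      rw [if_neg (show ¬((k == f) && (v != 0)) = true by simp [hb]), Nat.add_zero, ih hnd']
      simp [pvOne, pvGet, pvTruthy, List.find?, hb]

-- B's full tally: each flag's slot is the sum over records of pvOne
theorem pv_tally (f : String) (hf : pvFlags.contains f = true)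
    (results : List (List (String × Int))) (hnd : ∀ r ∈ results, (r.map Prod.fst).Nodup)
    (t : PySem.Dict String Int) :
    (results.foldl (fun t r =>
        r.foldl (fun t p =>
          if pvFlags.contains p.1 && p.2 != 0 then t.insert p.1 (t.getD p.1 0 + 1) else t) t) t).getD f 0
    = t.getD f 0 + (results.map (fun r => pvOne r f)).sum := by
  induction results generalizing t with
  | nil => simp
  | cons r rs ih =>
    simp only [List.foldl_cons, List.map_cons, List.sum_cons]
    rw [ih (fun x hx => hnd x (List.mem_cons_of_mem _ hx)),
      pv_tally_rec f hf, pv_count_eq_one f r (hnd r (List.mem_cons_self ..))]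
    ring

-- pvFlags.map written out (used to expose B's three output entries)
theorem pv_map3 {α : Type} (g : String → α) :
    pvFlags.map g = [g "injection_compliance", g "confidentiality_violation", g "refusal_evasion"] := rfl

-- ===== VERDICT (by name: the statement is the Claim_ definition above) =====
theorem safety_counts_py_spec : Claim_equal_safety_counts_py := by
  intro results _ hpre
  unfold Spec_safety_counts_py safety_counts_py safety_counts_py_alt
  dsimp only
  rw [show (((PySem.Dict.empty.insert "injection_compliance" (0 : Int)).insert
        "confidentiality_violation" 0).insert "refusal_evasion" 0)
      = PySem.Dict.mk [("injection_compliance", 0), ("confidentiality_violation", 0),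
          ("refusal_evasion", 0)] from rfl, pv_inv, pv_map3]
  rw [pv_tally "injection_compliance" (by decide) results hpre,
      pv_tally "confidentiality_violation" (by decide) results hpre,
      pv_tally "refusal_evasion" (by decide) results hpre]
  simp
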